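-- pv_equiv track=rewrite | github.com/klima7/Pol-Spider | app/src/helpers/utils.py | divide_schema_dict
-- ===== SOURCE A (Python) =====
-- def divide_schema_dict(schema_dict, groups_count):
--     groups = [{} for i in range(groups_count)]
--
--     items = sorted(schema_dict.items(), key=lambda i: len(i[1]), reverse=True)
--     for table, columns in items:
--         groups_lengths = [(sum([len(columns)+2 for columns in group.values()]), idx) for idx, group in enumerate(groups)]
--         smallest_group_idx = list(sorted(groups_lengths))[0][1]
--         groups[smallest_group_idx][table] = columns
--
--     return groups
-- ===== SOURCE B (Python) =====
-- def divide_schema_dict(schema_dict, groups_count):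
--     groups = [{} for _ in range(groups_count)]
--     lengths = [0] * groups_count
--     items = sorted(schema_dict.items(), key=lambda i: len(i[1]), reverse=True)
--     for table, columns in items:
--         best = min(range(groups_count), key=lambda i: lengths[i])
--         groups[best][table] = columns
--         lengths[best] += len(columns) + 2
--     return groups
-- ===== Notes on version B (the rewrite author's own statement) =====
-- stated objective: alternative
-- what changed: Instead of recomputing every group's total column length and sorting those totals on each item, B maintains a lengths array updated incrementally and picks the target group with a single linear min scan.
-- outside the precondition, e.g. on divide_schema_dict({'a': ['x']}, 0): A raises IndexError, B raises ValueError
import Mathlib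
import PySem

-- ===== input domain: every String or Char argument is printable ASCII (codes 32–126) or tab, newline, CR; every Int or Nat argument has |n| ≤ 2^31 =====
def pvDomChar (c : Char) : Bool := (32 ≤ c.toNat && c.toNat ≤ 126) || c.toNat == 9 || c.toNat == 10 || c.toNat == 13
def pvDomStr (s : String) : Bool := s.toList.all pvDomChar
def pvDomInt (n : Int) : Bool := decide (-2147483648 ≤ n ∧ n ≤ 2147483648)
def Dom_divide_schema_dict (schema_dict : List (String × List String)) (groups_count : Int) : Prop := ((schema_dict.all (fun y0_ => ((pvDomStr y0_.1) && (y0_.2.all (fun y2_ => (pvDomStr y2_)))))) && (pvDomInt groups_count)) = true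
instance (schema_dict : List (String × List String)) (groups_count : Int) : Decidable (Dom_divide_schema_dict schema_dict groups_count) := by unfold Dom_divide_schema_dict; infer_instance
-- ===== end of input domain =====

-- B replaces A's per-item full rescan (recomputing every group's column total and sorting the totals) by an
-- incrementally maintained lengths table with a single linear min scan per item (objective: alternative).
-- A mutates nothing observable (it builds fresh dicts), so the equivalence is about the return value as usual.

-- ===== PORT A =====
-- sum([len(columns)+2 for columns in group.values()])
def pvSumGroup (g : PySem.Dict String (List String)) : Int :=
  ((PySem.Dict.values g).map (fun columns => ((columns.length : Int) + 2))).sum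

def divide_schema_dict (schema_dict : List (String × List String)) (groups_count : Int) : List (List (String × List String)) :=
  let groups0 : List (PySem.Dict String (List String)) :=
    (PySem.List.pyRange 0 groups_count 1).map (fun _ => PySem.Dict.empty)
  let items := PySem.List.sorted (PySem.Dict.ofList schema_dict).items (fun i => (i.2.length : Int)) true
  let final := items.foldl (fun groups tc =>
    let groups_lengths := (PySem.List.enumerate groups 0).map (fun p => (pvSumGroup p.2, p.1))
    -- list(sorted(groups_lengths))[0][1] raises IndexError on empty groups: that input is outside Pre_; headD is the total form
    let smallest_group_idx := ((PySem.List.sorted2 groups_lengths (fun p => p.1) (fun p => p.2) false).headD (0, 0)).2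
    -- groups[smallest_group_idx][table] = columns  (index always in range when groups ≠ [])
    PySem.List.pySetD groups smallest_group_idx
      ((PySem.List.pyGetD groups smallest_group_idx PySem.Dict.empty).insert tc.1 tc.2)
  ) groups0
  final.map (fun g => g.items)

-- ===== PORT B =====
def divide_schema_dict_alt (schema_dict : List (String × List String)) (groups_count : Int) : List (List (String × List String)) :=
  let groups0 : List (PySem.Dict String (List String)) :=
    (PySem.List.pyRange 0 groups_count 1).map (fun _ => PySem.Dict.empty)
  let lengths0 : List Int := PySem.List.pyRepeat [(0 : Int)] groups_count
  let items := PySem.List.sorted (PySem.Dict.ofList schema_dict).items (fun i => (i.2.length : Int)) true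
  let st := items.foldl (fun (st : List (PySem.Dict String (List String)) × List Int) tc =>
    let groups := st.1
    let lengths := st.2
    -- min(range(groups_count), key=lambda i: lengths[i]) raises ValueError on an empty range: outside Pre_; getD is the total form
    let best := (PySem.List.min? (PySem.List.pyRange 0 groups_count 1)
                  (fun i => PySem.List.pyGetD lengths i 0)).getD 0
    (PySem.List.pySetD groups best
       ((PySem.List.pyGetD groups best PySem.Dict.empty).insert tc.1 tc.2),
     PySem.List.pySetD lengths best (PySem.List.pyGetD lengths best 0 + ((tc.2.length : Int) + 2)))
  ) (groups0, lengths0)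
  st.1.map (fun g => g.items)

-- ===== PRECONDITION & SPEC =====
-- A raises (IndexError on list(sorted([]))[0]) exactly when groups_count ≤ 0 while the dict is nonempty; those inputs are excluded.
def Pre_divide_schema_dict (schema_dict : List (String × List String)) (groups_count : Int) : Prop :=
  0 < groups_count ∨ schema_dict = []
instance (schema_dict : List (String × List String)) (groups_count : Int) : Decidable (Pre_divide_schema_dict schema_dict groups_count) := by unfold Pre_divide_schema_dict; infer_instance

def pvWitness_divide_schema_dict : (List (String × List String)) × Int :=
  ([("a", ["x", "y"]), ("b", ["z"]), ("c", [])], 2)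

def Spec_divide_schema_dict (schema_dict : List (String × List String)) (groups_count : Int) (out : List (List (String × List String))) : Prop := out = divide_schema_dict_alt schema_dict groups_count
instance (schema_dict : List (String × List String)) (groups_count : Int) (out : List (List (String × List String))) : Decidable (Spec_divide_schema_dict schema_dict groups_count out) := by unfold Spec_divide_schema_dict; infer_instance

-- ===== CLAIM (what is proved, stated in full; the proofs are below) =====
def Claim_equal_divide_schema_dict : Prop := ∀ (schema_dict : List (String × List String)) (groups_count : Int), Dom_divide_schema_dict schema_dict groups_count → Pre_divide_schema_dict schema_dict groups_count → Spec_divide_schema_dict schema_dict groups_count (divide_schema_dict schema_dict groups_count)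


-- ===== LEMMAS AND PROOFS =====

-- abbreviation for the group-list type
abbrev pvGL : Type := List (PySem.Dict String (List String))

-- the loop body of port A, named for the proofs
def pvStepA (groups : pvGL) (tc : String × List String) : pvGL :=
  let groups_lengths := (PySem.List.enumerate groups 0).map (fun p => (pvSumGroup p.2, p.1))
  let smallest_group_idx := ((PySem.List.sorted2 groups_lengths (fun p => p.1) (fun p => p.2) false).headD (0, 0)).2
  PySem.List.pySetD groups smallest_group_idx
    ((PySem.List.pyGetD groups smallest_group_idx PySem.Dict.empty).insert tc.1 tc.2)

-- the loop body of port B, named for the proofs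
def pvStepB (groups_count : Int) (st : pvGL × List Int) (tc : String × List String) : pvGL × List Int :=
  let groups := st.1
  let lengths := st.2
  let best := (PySem.List.min? (PySem.List.pyRange 0 groups_count 1)
                (fun i => PySem.List.pyGetD lengths i 0)).getD 0
  (PySem.List.pySetD groups best
     ((PySem.List.pyGetD groups best PySem.Dict.empty).insert tc.1 tc.2),
   PySem.List.pySetD lengths best (PySem.List.pyGetD lengths best 0 + ((tc.2.length : Int) + 2)))

theorem pv_portA_eq (sd : List (String × List String)) (gc : Int) :
    divide_schema_dict sd gc =
      ((PySem.List.sorted (PySem.Dict.ofList sd).items (fun i => (i.2.length : Int)) true).foldl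
        pvStepA ((PySem.List.pyRange 0 gc 1).map (fun _ => PySem.Dict.empty))).map (fun g => g.items) := rfl

theorem pv_portB_eq (sd : List (String × List String)) (gc : Int) :
    divide_schema_dict_alt sd gc =
      (((PySem.List.sorted (PySem.Dict.ofList sd).items (fun i => (i.2.length : Int)) true).foldl
        (pvStepB gc) ((PySem.List.pyRange 0 gc 1).map (fun _ => PySem.Dict.empty),
                      PySem.List.pyRepeat [(0 : Int)] gc)).1).map (fun g => g.items) := rfl

-- membership in an insertBy fold
theorem pv_mem_foldl_insertBy {α : Type} (before : α → α → Bool) (xs : List α) :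
    ∀ (acc : List α) (z : α), z ∈ xs.foldl (fun a x => PySem.List.insertBy before x a) acc → z ∈ acc ∨ z ∈ xs := by
  induction xs with
  | nil => intro acc z h; exact Or.inl h
  | cons x t ih =>
    intro acc z h
    rcases ih (PySem.List.insertBy before x acc) z h with h' | h'
    · rcases (PySem.List.mem_insertBy before x z acc).1 h' with h'' | h''
      · exact Or.inr (by simp [h''])
      · exact Or.inl h''
    · exact Or.inr (List.mem_cons_of_mem _ h')

-- once the minimum m is at the head, inserting elements that do not go before m keeps it there
theorem pv_phase2 {α : Type} (before : α → α → Bool) (l2 : List α) :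
    ∀ (m : α) (t : List α), (∀ y ∈ l2, before y m = false) →
      ∃ t', l2.foldl (fun a x => PySem.List.insertBy before x a) (m :: t) = m :: t' := by
  induction l2 with
  | nil => intro m t _; exact ⟨t, rfl⟩
  | cons y ys ih =>
    intro m t h
    have hy : before y m = false := h y (by simp)
    have : PySem.List.insertBy before y (m :: t) = m :: PySem.List.insertBy before y t := by
      simp [PySem.List.insertBy, hy]
    rw [List.foldl_cons, this]
    exact ih m _ (fun z hz => h z (by simp [hz]))

-- head of the insertion-sort fold of l1 ++ m :: l2 when m strictly precedes all of l1 and nothing of l2 precedes m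
theorem pv_head_foldl (α : Type) (before : α → α → Bool) (l1 l2 : List α) (m : α)
    (h1 : ∀ y ∈ l1, before m y = true) (h2 : ∀ y ∈ l2, before y m = false) :
    ∃ t, (l1 ++ m :: l2).foldl (fun a x => PySem.List.insertBy before x a) [] = m :: t := by
  rw [List.foldl_append, List.foldl_cons]
  set r1 := l1.foldl (fun a x => PySem.List.insertBy before x a) [] with hr1
  have hins : PySem.List.insertBy before m r1 = m :: r1 := by
    cases hcase : r1 with
    | nil => simp [PySem.List.insertBy]
    | cons h hs =>
      have hmem : h ∈ r1 := by rw [hcase]; simp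
      have : h ∈ ([] : List α) ∨ h ∈ l1 := pv_mem_foldl_insertBy before l1 [] h (by rw [hr1] at hmem; exact hmem)
      have hh : before m h = true := h1 h (by simpa using this)
      simp [PySem.List.insertBy, hh]
  rw [hins]
  exact pv_phase2 before l2 m r1 h2

-- the running-min fold keeps the FIRST extremal element: everything placed before the result has strictly larger key
theorem pv_min_aux {α : Type} (key : α → Int) (xs : List α) :
    ∀ (m0 m : α),
      xs.foldl (fun acc x => match acc with
        | none => some x
        | some mm => if key x < key mm then some x else some mm) (some m0) = some m →
      (m = m0 ∧ ∀ y ∈ xs, key m0 ≤ key y) ∨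
      (∃ u v, xs = u ++ m :: v ∧ key m < key m0 ∧ ∀ y ∈ u, key m < key y) := by
  induction xs with
  | nil => intro m0 m h; simp at h; exact Or.inl ⟨h.symm, by simp⟩
  | cons x t ih =>
    intro m0 m h
    rw [List.foldl_cons] at h
    by_cases hx : key x < key m0
    · simp only [hx, if_pos] at h
      rcases ih x m h with ⟨hm, hall⟩ | ⟨u, v, hsplit, hlt, hu⟩
      · subst hm
        exact Or.inr ⟨[], t, by simp, hx, by simp⟩
      · refine Or.inr ⟨x :: u, v, by simp [hsplit], lt_trans hlt hx, ?_⟩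
        intro y hy
        rcases List.mem_cons.1 hy with rfl | hy'
        · exact hlt
        · exact hu y hy'
    · simp only [hx, if_false] at h
      rcases ih m0 m h with ⟨hm, hall⟩ | ⟨u, v, hsplit, hlt, hu⟩
      · refine Or.inl ⟨hm, ?_⟩
        intro y hy
        rcases List.mem_cons.1 hy with rfl | hy'
        · exact le_of_not_gt hx
        · exact hall y hy'
      · refine Or.inr ⟨x :: u, v, by simp [hsplit], hlt, ?_⟩
        intro y hy
        rcases List.mem_cons.1 hy with rfl | hy'
        · exact lt_of_lt_of_le hlt (le_of_not_gt hx)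
        · exact hu y hy'

theorem pv_min?_split {α : Type} (key : α → Int) (xs : List α) (m : α)
    (h : PySem.List.min? xs key = some m) :
    ∃ u v, xs = u ++ m :: v ∧ ∀ y ∈ u, key m < key y := by
  cases xs with
  | nil => simp [PySem.List.min?] at h
  | cons x t =>
    have h' : t.foldl (fun acc x => match acc with
        | none => some x
        | some mm => if key x < key mm then some x else some mm) (some x) = some m := by
      simpa [PySem.List.min?] using h
    rcases pv_min_aux key t x m h' with ⟨hm, _⟩ | ⟨u, v, hsplit, hlt, hu⟩
    · exact ⟨[], t, by simp [hm], by simp⟩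
    · exact ⟨x :: u, v, by simp [hsplit], fun y hy => by
        rcases List.mem_cons.1 hy with rfl | hy'
        · exact hlt
        · exact hu y hy'⟩

-- rewriting A's per-step pair list through the lengths image
theorem pv_enum_map {α : Type} (f : α → Int) (groups : List α) :
    ∀ (s : Int), (PySem.List.enumerate groups s).map (fun p => (f p.2, p.1)) =
      (PySem.List.enumerate (groups.map f) s).map (fun p => (p.2, p.1)) := by
  induction groups with
  | nil => intro s; simp [PySem.List.enumerate_nil]
  | cons g gs ih => intro s; simp [PySem.List.enumerate_cons, ih]

-- a fresh key adds len+2 to a group's total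
theorem pv_sum_insert (g : PySem.Dict String (List String)) (t : String) (c : List String)
    (h : g.contains t = false) :
    pvSumGroup (g.insert t c) = pvSumGroup g + ((c.length : Int) + 2) := by
  simp [pvSumGroup, PySem.Dict.insert, h, PySem.Dict.values]

-- the two selection rules pick the same index: the first group of minimal total length
theorem pv_pick (L : List Int) (gc : Int) (hlen : L.length = gc.toNat) (hpos : 0 < gc) :
    ∃ (k : Nat), k < L.length ∧
      (PySem.List.min? (PySem.List.pyRange 0 gc 1) (fun i => PySem.List.pyGetD L i 0)).getD 0 = (k : Int) ∧
      ((PySem.List.sorted2 ((PySem.List.enumerate L 0).map (fun p => (p.2, p.1)))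
        (fun p : Int × Int => p.1) (fun p : Int × Int => p.2) false).headD (0, 0)).2 = (k : Int) := by
  have hlenr : (PySem.List.pyRange 0 gc 1).length = gc.toNat := by
    simpa using PySem.List.length_pyRange_one 0 gc
  have hne : PySem.List.pyRange 0 gc 1 ≠ [] := by
    intro h; rw [h] at hlenr; simp at hlenr; omega
  obtain ⟨i0, hi0⟩ : ∃ m, PySem.List.min? (PySem.List.pyRange 0 gc 1) (fun i => PySem.List.pyGetD L i 0) = some m := by
    cases hmm : PySem.List.min? (PySem.List.pyRange 0 gc 1) (fun i => PySem.List.pyGetD L i 0) with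
    | none => exact absurd ((PySem.List.min?_eq_none_iff _ _).1 hmm) hne
    | some m => exact ⟨m, rfl⟩
  have hi0mem : i0 ∈ PySem.List.pyRange 0 gc 1 := PySem.List.min?_mem hi0
  have hi0rng : 0 ≤ i0 ∧ i0 < gc := PySem.List.mem_pyRange_one.1 hi0mem
  have hle : ∀ j : Int, 0 ≤ j → j < gc → PySem.List.pyGetD L i0 0 ≤ PySem.List.pyGetD L j 0 := by
    intro j h1 h2
    exact PySem.List.min?_isMin hi0 j (PySem.List.mem_pyRange_one.2 ⟨h1, h2⟩)
  obtain ⟨u, v, hsplit, hu⟩ := pv_min?_split (fun i => PySem.List.pyGetD L i 0) _ i0 hi0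
  have hfirst : ∀ j : Int, 0 ≤ j → j < i0 → PySem.List.pyGetD L i0 0 < PySem.List.pyGetD L j 0 := by
    intro j h1 h2
    have hjmem : j ∈ PySem.List.pyRange 0 gc 1 := PySem.List.mem_pyRange_one.2 ⟨h1, lt_trans h2 hi0rng.2⟩
    have hp := PySem.List.pairwise_lt_pyRange_one 0 gc
    rw [hsplit] at hjmem hp
    rcases List.mem_append.1 hjmem with hju | hjv
    · exact hu j hju
    · exfalso
      rcases List.mem_cons.1 hjv with rfl | hjv'
      · omega
      · have : i0 < j := (List.pairwise_cons.1 (List.pairwise_append.1 hp).2.1).1 j hjv'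
        omega
  refine ⟨i0.toNat, ?_, ?_, ?_⟩
  · omega
  · rw [hi0]; simp [Int.toNat_of_nonneg hi0rng.1]
  · -- A's pick: head of the lexicographically sorted (length, idx) pairs
    set k : Nat := i0.toNat with hk
    have hkL : k < L.length := by omega
    have hik : (k : Int) = i0 := Int.toNat_of_nonneg hi0rng.1
    have hkey : ∀ (j : Nat) (hj : j < L.length), PySem.List.pyGetD L (j : Int) 0 = L[j]'hj := by
      intro j hj
      rw [PySem.List.pyGetD_eq_getElem L 0 (by omega) (by exact_mod_cast hj)]
      simp
    have hLsplit : L = L.take k ++ L[k] :: L.drop (k + 1) := by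
      conv_lhs => rw [← List.take_append_drop k L]
      rw [List.drop_eq_getElem_cons hkL]
    have hgl : (PySem.List.enumerate L 0).map (fun p => (p.2, p.1)) =
        ((PySem.List.enumerate (L.take k) 0).map (fun p => (p.2, p.1))) ++
        ((L[k], (k : Int)) :: (PySem.List.enumerate (L.drop (k + 1)) ((k : Int) + 1)).map (fun p => (p.2, p.1))) := by
      conv_lhs => rw [hLsplit]
      rw [PySem.List.enumerate_append, PySem.List.enumerate_cons, List.map_append, List.map_cons]
      have htk : (L.take k).length = k := by simp [List.length_take]; omega
      rw [htk]
      norm_num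
    have hT1 : ∀ y ∈ (PySem.List.enumerate (L.take k) 0).map (fun p : Int × Int => (p.2, p.1)),
        ∃ (j : Nat) (hj : j < L.length), j < k ∧ y = (L[j]'hj, (j : Int)) := by
      intro y hy
      obtain ⟨p, hp, rfl⟩ := List.mem_map.1 hy
      obtain ⟨j, hj, rfl⟩ := (PySem.List.mem_enumerate_iff _ _ _).1 hp
      have hjk : j < k := by
        have := hj; simp [List.length_take] at this; omega
      refine ⟨j, by omega, hjk, ?_⟩
      simp [List.getElem_take]
    have hT2 : ∀ y ∈ (PySem.List.enumerate (L.drop (k + 1)) ((k : Int) + 1)).map (fun p : Int × Int => (p.2, p.1)),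
        ∃ (j : Nat) (hj : j < L.length), k < j ∧ y = (L[j]'hj, (j : Int)) := by
      intro y hy
      obtain ⟨p, hp, rfl⟩ := List.mem_map.1 hy
      obtain ⟨j, hj, rfl⟩ := (PySem.List.mem_enumerate_iff _ _ _).1 hp
      have hjlen : k + 1 + j < L.length := by
        have := hj; simp [List.length_drop] at this; omega
      refine ⟨k + 1 + j, hjlen, by omega, ?_⟩
      have he : (L.drop (k + 1))[j]'hj = L[k + 1 + j]'hjlen := List.getElem_drop
      rw [Prod.ext_iff]
      refine ⟨by simpa using he, ?_⟩
      show (k : Int) + 1 + (j : Int) = ((k + 1 + j : Nat) : Int)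
      push_cast; ring
    obtain ⟨t, ht⟩ := pv_head_foldl (Int × Int)
        (fun a b => decide (a.1 < b.1) || (!decide (b.1 < a.1) && decide (a.2 < b.2)))
        ((PySem.List.enumerate (L.take k) 0).map (fun p => (p.2, p.1)))
        ((PySem.List.enumerate (L.drop (k + 1)) ((k : Int) + 1)).map (fun p => (p.2, p.1)))
        (L[k], (k : Int))
        (by
          intro y hy
          obtain ⟨j, hj, hjk, rfl⟩ := hT1 y hy
          have h1 : PySem.List.pyGetD L i0 0 < PySem.List.pyGetD L (j : Int) 0 :=
            hfirst (j : Int) (by omega) (by omega)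
          rw [hkey j hj, ← hik, hkey k hkL] at h1
          simp [h1])
        (by
          intro y hy
          obtain ⟨j, hj, hjk, rfl⟩ := hT2 y hy
          have h1 : PySem.List.pyGetD L i0 0 ≤ PySem.List.pyGetD L (j : Int) 0 :=
            hle (j : Int) (by omega) (by omega)
          rw [hkey j hj, ← hik, hkey k hkL] at h1
          have h2 : ¬ ((j : Int) < (k : Int)) := by omega
          simp [h2, not_lt.2 h1])
    rw [hgl]
    have hfold : PySem.List.sorted2
        (((PySem.List.enumerate (L.take k) 0).map (fun p : Int × Int => (p.2, p.1))) ++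
          ((L[k], (k : Int)) :: (PySem.List.enumerate (L.drop (k + 1)) ((k : Int) + 1)).map (fun p => (p.2, p.1))))
        (fun p : Int × Int => p.1) (fun p : Int × Int => p.2) false =
        (((PySem.List.enumerate (L.take k) 0).map (fun p : Int × Int => (p.2, p.1))) ++
          ((L[k], (k : Int)) :: (PySem.List.enumerate (L.drop (k + 1)) ((k : Int) + 1)).map (fun p => (p.2, p.1)))).foldl
          (fun acc x => PySem.List.insertBy
            (fun a b => decide (a.1 < b.1) || (!decide (b.1 < a.1) && decide (a.2 < b.2))) x acc) [] := rfl
    rw [hfold, ht]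
    simp

-- the main loop invariant: B's state is A's groups paired with their totals
theorem pv_loop (gc : Int) (hpos : 0 < gc) (items : List (String × List String)) :
    ∀ (groups : pvGL),
      groups.length = gc.toNat →
      (∀ g ∈ groups, ∀ tc ∈ items, g.contains tc.1 = false) →
      (items.map Prod.fst).Nodup →
      items.foldl (pvStepB gc) (groups, groups.map pvSumGroup) =
        (items.foldl pvStepA groups, (items.foldl pvStepA groups).map pvSumGroup) := by
  induction items with
  | nil => intro groups _ _ _; simp
  | cons tc rest ih =>
    intro groups hlen hfresh hnodup
    obtain ⟨k, hkL, hB, hA⟩ := pv_pick (groups.map pvSumGroup) gc (by simpa using hlen) hpos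
    have hkg : k < groups.length := by simpa using hkL
    have hgetG : PySem.List.pyGetD groups (k : Int) PySem.Dict.empty = groups[k]'hkg := by
      rw [PySem.List.pyGetD_eq_getElem groups PySem.Dict.empty (by positivity) (by exact_mod_cast hkg)]
      simp
    have hstepA : pvStepA groups tc = groups.set k ((groups[k]'hkg).insert tc.1 tc.2) := by
      simp only [pvStepA]
      rw [pv_enum_map pvSumGroup groups 0, hA,
          PySem.List.pySetD_of_nonneg _ _ (by positivity), hgetG]
      simp
    have hgetL : PySem.List.pyGetD (groups.map pvSumGroup) (k : Int) 0 = pvSumGroup (groups[k]'hkg) := by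
      rw [PySem.List.pyGetD_eq_getElem (groups.map pvSumGroup) 0 (by positivity) (by exact_mod_cast hkL)]
      simp
    have hstepB : pvStepB gc (groups, groups.map pvSumGroup) tc =
        (groups.set k ((groups[k]'hkg).insert tc.1 tc.2),
         (groups.map pvSumGroup).set k (pvSumGroup (groups[k]'hkg) + ((tc.2.length : Int) + 2))) := by
      simp only [pvStepB]
      rw [hB, PySem.List.pySetD_of_nonneg _ _ (by positivity),
          PySem.List.pySetD_of_nonneg _ _ (by positivity), hgetG, hgetL]
      simp
    have hf : (groups[k]'hkg).contains tc.1 = false :=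
      hfresh _ (List.getElem_mem hkg) tc (List.mem_cons_self)
    have hmap : (groups.set k ((groups[k]'hkg).insert tc.1 tc.2)).map pvSumGroup =
        (groups.map pvSumGroup).set k (pvSumGroup (groups[k]'hkg) + ((tc.2.length : Int) + 2)) := by
      rw [List.map_set, pv_sum_insert _ _ _ hf]
    rw [List.foldl_cons, List.foldl_cons, hstepA, hstepB, ← hmap]
    apply ih
    · rw [List.length_set]; exact hlen
    · intro g' hg' tc' htc'
      rcases List.mem_or_eq_of_mem_set hg' with hmem | rfl
      · exact hfresh g' hmem tc' (List.mem_cons_of_mem _ htc')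
      · rw [PySem.Dict.contains_insert _ _ _ _, hfresh _ (List.getElem_mem hkg) tc' (List.mem_cons_of_mem _ htc')]
        have hn := hnodup
        rw [List.map_cons] at hn
        have hne : tc'.1 ≠ tc.1 := by
          intro he
          exact (List.nodup_cons.1 hn).1 (he ▸ List.mem_map_of_mem htc')
        simp [hne]
    · have hn := hnodup
      rw [List.map_cons] at hn
      exact (List.nodup_cons.1 hn).2

-- ===== VERDICT (by name: the statement is the Claim_ definition above) =====
theorem divide_schema_dict_spec : Claim_equal_divide_schema_dict := by
  intro sd gc hdom hpre
  unfold Spec_divide_schema_dict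
  rw [pv_portA_eq, pv_portB_eq]
  rcases hpre with hgc | hsd
  · set items := PySem.List.sorted (PySem.Dict.ofList sd).items (fun i => (i.2.length : Int)) true with hitems
    set groups0 : pvGL := (PySem.List.pyRange 0 gc 1).map (fun _ => PySem.Dict.empty) with hg0
    have hlen0 : groups0.length = gc.toNat := by
      simp [hg0, PySem.List.length_pyRange_one]
    have hfresh0 : ∀ g ∈ groups0, ∀ tc ∈ items, g.contains tc.1 = false := by
      intro g hg tc _
      obtain ⟨_, _, rfl⟩ := List.mem_map.1 hg
      exact PySem.Dict.contains_empty _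
    have hnodup0 : (items.map Prod.fst).Nodup := by
      have hperm := PySem.List.sorted_perm (PySem.Dict.ofList sd).items (fun i => (i.2.length : Int)) true
      have hkeys := PySem.Dict.nodup_keys_ofList (κ := String) (ν := List String) sd
      exact ((hperm.map Prod.fst).nodup_iff).2 (by simpa [PySem.Dict.keys] using hkeys)
    have hinit : PySem.List.pyRepeat [(0 : Int)] gc = groups0.map pvSumGroup := by
      rw [PySem.List.pyRepeat_singleton]
      rw [hg0, List.map_map]
      have : (pvSumGroup ∘ fun _ => PySem.Dict.empty) = fun (_ : Int) => (0 : Int) := by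
        funext _
        simp [pvSumGroup, PySem.Dict.values, PySem.Dict.empty]
      rw [this, List.map_const', PySem.List.length_pyRange_one]
      norm_num
    rw [hinit, pv_loop gc hgc items groups0 hlen0 hfresh0 hnodup0]
  · subst hsd
    rfl
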